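-- pv_equiv track=rewrite | github.com/pk2931/lm_studio_project_usingStreamlit | Main.py | populate_lines
-- ===== SOURCE A (Python) =====
-- def populate_lines(text):
--     l = text.split('\n')
--     s = ''
--     for i in range(0, len(l), 2):
--         try:
--             s = s + l[i] + ' ' + l[i+1] + '\n'
--         except:
--             s = s + l[i] + '\n'
--     return s
-- ===== SOURCE B (Python) =====
-- def populate_lines(text):
--     l = text.split('\n')
--     evens = l[0::2]
--     odds = l[1::2]
--     groups = [a + ' ' + b for a, b in zip(evens, odds)]
--     if len(evens) > len(odds):
--         groups.append(evens[-1])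
--     return '\n'.join(groups) + '\n'
-- ===== Notes on version B (the rewrite author's own statement) =====
-- stated objective: idiomatic
-- what changed: Replaces the step-2 index loop with try/except and incremental string concatenation by slicing the lines into evens/odds, pairing them with zip (plus the leftover even line when the count is odd), and a single newline-join.
import Mathlib
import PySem

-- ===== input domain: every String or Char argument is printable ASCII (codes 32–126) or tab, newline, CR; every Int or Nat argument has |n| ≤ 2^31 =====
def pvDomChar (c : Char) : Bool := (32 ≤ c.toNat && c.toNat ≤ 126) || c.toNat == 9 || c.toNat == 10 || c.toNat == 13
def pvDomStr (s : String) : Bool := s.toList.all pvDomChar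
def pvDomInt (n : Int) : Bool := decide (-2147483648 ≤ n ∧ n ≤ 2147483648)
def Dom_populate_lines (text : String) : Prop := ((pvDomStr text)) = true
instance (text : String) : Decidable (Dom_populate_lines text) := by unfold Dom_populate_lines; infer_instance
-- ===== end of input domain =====

-- B replaces A's step-2 index loop with try/except and incremental concatenation by
-- even/odd slices paired with zip plus one join (idiomatic decomposition, same cost).


-- ===== PORT A =====
-- one loop step: `s = s + l[i] + ' ' + l[i+1] + '\n'`, falling back to
-- `s = s + l[i] + '\n'` on IndexError.  `i` always comes from range(0, len(l), 2),
-- so `l[i]` is always in range and only `l[i+1]` can raise: `pyGetD l i []` is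
-- exact for `l[i]` here.
def pvStepA (l : List (List Char)) (s : List Char) (i : Int) : List Char :=
  match PySem.List.pyGet? l (i + 1) with
  | some b => s ++ PySem.List.pyGetD l i [] ++ [' '] ++ b ++ ['\n']
  | none   => s ++ PySem.List.pyGetD l i [] ++ ['\n']

def populate_lines (text : String) : String :=
  let l := PySem.Chars.splitOn text.toList ['\n']
  let s := (PySem.List.pyRange 0 (l.length : Int) 2).foldl (pvStepA l) ([] : List Char)
  String.ofList s

-- ===== PORT B =====
def populate_lines_alt (text : String) : String :=
  let l := PySem.Chars.splitOn text.toList ['\n']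
  let evens := (PySem.List.slice? l none none 2).getD []        -- l[0::2]; step 2 ≠ 0, so always `some`
  let odds := (PySem.List.slice? l (some 1) none 2).getD []     -- l[1::2]
  let groups := (evens.zip odds).map (fun p => p.1 ++ [' '] ++ p.2)
  let groups := if odds.length < evens.length
    then groups ++ [PySem.List.pyGetD evens (-1) []]            -- evens[-1]; evens ≠ [] in this branch
    else groups
  String.ofList (PySem.Chars.join ['\n'] groups ++ ['\n'])

-- ===== PRECONDITION & SPEC =====
def Spec_populate_lines (text : String) (out : String) : Prop := out = populate_lines_alt text
instance (text : String) (out : String) : Decidable (Spec_populate_lines text out) := by unfold Spec_populate_lines; infer_instance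

-- ===== CLAIM (what is proved, stated in full; the proofs are below) =====
def Claim_equal_populate_lines : Prop := ∀ (text : String), Dom_populate_lines text → Spec_populate_lines text (populate_lines text)

-- ===== LEMMAS AND PROOFS =====

-- the value both programs compute on the line list: consecutive pairs joined by ' ',
-- each group (and a leftover last line) followed by '\n'
def pvGo : List (List Char) → List Char
  | [] => []
  | [a] => a ++ ['\n']
  | a :: b :: t => a ++ [' '] ++ b ++ ['\n'] ++ pvGo t

-- every other element, starting at the head (what l[0::2] selects)
def pvEO {α : Type} : List α → List α
  | [] => []
  | [a] => [a]
  | a :: _ :: t => a :: pvEO t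

-- B's group list on line list a :: t (with pvEO (a :: t) for evens, pvEO t for odds)
def pvGroups (l : List (List Char)) : List (List Char) :=
  let evens := pvEO l
  let odds := pvEO l.tail
  let groups := (evens.zip odds).map (fun p => p.1 ++ [' '] ++ p.2)
  if odds.length < evens.length
    then groups ++ [PySem.List.pyGetD evens (-1) []]
    else groups

theorem pvSplitOn_go_ne_nil (sep : List Char) :
    ∀ (fuel : Nat) (l cur : List Char) (acc : List (List Char)),
      PySem.Chars.splitOn.go sep fuel l cur acc ≠ [] := by
  intro fuel
  induction fuel with
  | zero => intro l cur acc; simp [PySem.Chars.splitOn.go]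
  | succ n ih =>
    intro l cur acc
    cases l with
    | nil => simp [PySem.Chars.splitOn.go]
    | cons c rest =>
      rw [PySem.Chars.splitOn.go]
      split_ifs with h
      · exact ih _ _ _
      · exact ih _ _ _

theorem pvSplitOn_ne_nil (s sep : List Char) : PySem.Chars.splitOn s sep ≠ [] := by
  rw [PySem.Chars.splitOn]; exact pvSplitOn_go_ne_nil _ _ _ _ _

theorem pvEO_spec {α : Type} : ∀ (l : List α),
    (List.range ((l.length + 1) / 2)).filterMap (fun k => l[2 * k]?) = pvEO l
  | [] => by simp [pvEO]
  | [a] => by simp [pvEO]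
  | a :: b :: t => by
    rw [show ((a :: b :: t).length + 1) / 2 = (t.length + 1) / 2 + 1 by simp; omega,
        List.range_succ_eq_map, List.filterMap_cons, List.filterMap_map]
    simp only [Nat.mul_zero, List.getElem?_cons_zero, Function.comp_def]
    rw [show (fun k : Nat => (a :: b :: t)[2 * Nat.succ k]?) = (fun k : Nat => t[2 * k]?) from
      funext fun k => by
        rw [show 2 * Nat.succ k = 2 * k + 1 + 1 by omega, List.getElem?_cons_succ,
            List.getElem?_cons_succ]]
    rw [pvEO_spec t]
    rfl

-- characterisation of l[0::2]
theorem pvSlice_evens {α : Type} (l : List α) :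
    PySem.List.slice? l none none 2 = some (pvEO l) := by
  rw [PySem.List.slice?]
  simp only [PySem.List.sliceIndices]
  norm_num
  rw [show (if 0 < l.length then (((l.length : Int) + 2 - 1) / 2).toNat else 0)
      = (l.length + 1) / 2 by split_ifs <;> omega]
  rw [show (fun x : Nat => l[(2 * (x : Int)).toNat]?) = (fun k : Nat => l[2 * k]?) from
    funext fun k => by rw [show ((2 * (k : Int)).toNat) = 2 * k by omega]]
  exact pvEO_spec l

-- characterisation of l[1::2]
theorem pvSlice_odds {α : Type} (a : α) (t : List α) :
    PySem.List.slice? (a :: t) (some 1) none 2 = some (pvEO t) := by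
  rw [PySem.List.slice?]
  simp only [PySem.List.sliceIndices]
  norm_num
  rw [show (if 0 < t.length then (((t.length : Int) + 2 - 1) / 2).toNat else 0)
      = (t.length + 1) / 2 by split_ifs <;> omega]
  rw [show (fun x : Nat => (a :: t)[(1 + 2 * (x : Int)).toNat]?) = (fun k : Nat => t[2 * k]?) from
    funext fun k => by
      rw [show ((1 + 2 * (k : Int)).toNat) = 2 * k + 1 by omega, List.getElem?_cons_succ]]
  exact pvEO_spec t

theorem pvEO_ne_nil {α : Type} (x : α) (xs : List α) : pvEO (x :: xs) ≠ [] := by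
  cases xs <;> simp [pvEO]

theorem pvGroups_ne_nil (x : List Char) (xs : List (List Char)) : pvGroups (x :: xs) ≠ [] := by
  rw [pvGroups]
  split_ifs with h
  · simp
  · intro hnil
    have he := pvEO_ne_nil x xs
    have h1 : 0 < (pvEO (x :: xs)).length := List.length_pos_of_ne_nil he
    have hz : ((pvEO (x :: xs)).zip (pvEO (x :: xs).tail)).length = 0 := by
      simpa using congrArg List.length hnil
    rw [List.length_zip] at hz
    omega

theorem pvGroups_cons_cons (a b c : List Char) (t' : List (List Char)) :
    pvGroups (a :: b :: c :: t') = (a ++ [' '] ++ b) :: pvGroups (c :: t') := by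
  rw [pvGroups, pvGroups]
  simp only [List.tail_cons,
    show pvEO (a :: b :: c :: t') = a :: pvEO (c :: t') from rfl,
    show pvEO (b :: c :: t') = b :: pvEO t' from rfl,
    List.zip_cons_cons, List.map_cons, List.length_cons]
  have hiff : (pvEO t').length + 1 < (pvEO (c :: t')).length + 1 ↔
      (pvEO t').length < (pvEO (c :: t')).length := by omega
  split_ifs with h h' h'
  · rw [PySem.List.pyGetD_neg_one _ [] (by simp),
        PySem.List.pyGetD_neg_one _ [] (pvEO_ne_nil c t'),
        List.getLast_cons (pvEO_ne_nil c t')]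
    rfl
  · exact absurd (hiff.mp h) h'
  · exact absurd (hiff.mpr h') h
  · rfl

-- B computes pvGo on any nonempty line list
theorem pvJoinB : ∀ (t : List (List Char)) (a : List Char),
    PySem.Chars.join ['\n'] (pvGroups (a :: t)) ++ ['\n'] = pvGo (a :: t)
  | [] , a => by
    rw [pvGroups]
    simp only [pvEO, List.tail_cons, List.zip_nil_right, List.map_nil, List.length_nil,
      List.length_cons, List.nil_append]
    norm_num
    rw [show PySem.List.pyGetD [a] (-1) [] = a from
      PySem.List.pyGetD_neg_one_append_singleton [] a []]
    simp [pvGo]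
  | [b], a => by
    rw [pvGroups]
    simp only [pvEO, List.tail_cons]
    norm_num
    simp [pvGo]
  | b :: c :: t', a => by
    rw [pvGroups_cons_cons]
    obtain ⟨r, rs, hr⟩ := List.exists_cons_of_ne_nil (pvGroups_ne_nil c t')
    rw [hr, PySem.Chars.join_cons_cons, ← hr]
    rw [show pvGo (a :: b :: c :: t') = a ++ [' '] ++ b ++ ['\n'] ++ pvGo (c :: t') from rfl]
    rw [← pvJoinB t' c]
    simp [List.append_assoc]

-- pyRange 0 (n+2) 2 is 0 followed by the shifted pyRange 0 n 2
theorem pvRange2_shift (n : Nat) :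
    PySem.List.pyRange 0 ((n : Int) + 2) 2 = 0 :: (PySem.List.pyRange 0 (n : Int) 2).map (· + 2) := by
  rw [PySem.List.pyRange_of_pos 0 ((n : Int) + 2) (by norm_num),
      PySem.List.pyRange_of_pos 0 (n : Int) (by norm_num)]
  rw [show (if (0 : Int) < (n : Int) + 2 then (((n : Int) + 2 - 0 + 2 - 1) / 2).toNat else 0)
      = (if (0 : Int) < (n : Int) then (((n : Int) - 0 + 2 - 1) / 2).toNat else 0) + 1 by
    split_ifs <;> omega]
  rw [List.range_succ_eq_map, List.map_cons, List.map_map]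
  norm_num
  intro k _
  ring

-- shifting A's loop body two places down the line list drops the first two lines
theorem pvStepA_shift (a b : List Char) (t : List (List Char)) (acc : List Char) (x : Int)
    (hx : 0 ≤ x) : pvStepA (a :: b :: t) acc (x + 2) = pvStepA t acc x := by
  obtain ⟨k, rfl⟩ := Int.eq_ofNat_of_zero_le hx
  have h1 : ((k : Int) + 2 + 1) = ((k + 2 : Nat) : Int) + 1 := by push_cast; ring
  have h2 : ((k : Int) + 2) = ((k + 2 : Nat) : Int) := by push_cast; ring
  have h3 : ((k + 2 : Nat) : Int) = ((k + 1 : Nat) : Int) + 1 := by push_cast; ring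
  have h4 : ((k : Int) + 1) = ((k + 1 : Nat) : Int) := by push_cast; ring
  rw [pvStepA, pvStepA, h1, PySem.List.pyGet?_cons_succ, h3, PySem.List.pyGet?_cons_succ,
      h2, h4, PySem.List.pyGetD_natCast, PySem.List.pyGetD_natCast]
  simp

-- A's loop computes pvGo
theorem pvLemA : ∀ (l : List (List Char)) (s : List Char),
    (PySem.List.pyRange 0 (l.length : Int) 2).foldl (pvStepA l) s = s ++ pvGo l
  | [], s => by
    rw [show ((([] : List (List Char)).length : Int)) = 0 by simp]
    rw [show PySem.List.pyRange 0 0 2 = [] by decide]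
    simp [pvGo]
  | [a], s => by
    rw [show ((([a] : List (List Char)).length : Int)) = 1 by simp]
    rw [show PySem.List.pyRange 0 1 2 = [0] by decide]
    simp only [List.foldl_cons, List.foldl_nil, pvStepA]
    rw [show PySem.List.pyGet? [a] ((0 : Int) + 1) = none by
      rw [PySem.List.pyGet?_eq_none_iff]; simp [PySem.Raise.InRange]]
    simp [pvGo, PySem.List.pyGetD_zero_cons]
  | a :: b :: t, s => by
    rw [show (((a :: b :: t).length : Int)) = (t.length : Int) + 2 by simp; omega]
    rw [pvRange2_shift]
    simp only [List.foldl_cons, List.foldl_map]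
    rw [PySem.List.foldl_congr_mem _ _ (pvStepA t) _ (fun acc x hx => pvStepA_shift a b t acc x
      ((PySem.List.mem_pyRange_iff_of_pos (by norm_num) x).mp hx).1)]
    rw [pvLemA t]
    rw [show pvStepA (a :: b :: t) s 0 = s ++ a ++ [' '] ++ b ++ ['\n'] by
      rw [pvStepA, show (0 : Int) + 1 = ((0 : Nat) : Int) + 1 by norm_num,
          PySem.List.pyGet?_cons_succ]
      simp [PySem.List.pyGetD_zero_cons]]
    simp [pvGo, List.append_assoc]

-- ===== VERDICT (by name: the statement is the Claim_ definition above) =====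
theorem populate_lines_spec : Claim_equal_populate_lines := by
  intro text _
  unfold Spec_populate_lines populate_lines populate_lines_alt
  obtain ⟨a, t, hl⟩ := List.exists_cons_of_ne_nil (pvSplitOn_ne_nil text.toList ['\n'])
  simp only [hl, pvSlice_evens, pvSlice_odds, Option.getD_some]
  rw [pvLemA (a :: t) [], List.nil_append, ← pvJoinB t a, pvGroups]
  simp only [List.tail_cons]
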